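-- pv_equiv track=rewrite | github.com/Omen4Dead/py.checkio | List but not the least/Zigzag Array.py | create_zigzag
-- ===== SOURCE A (Python) =====
-- def create_zigzag(rows: int, cols: int, start: int = 1) -> list[list[int]]:
--     # your code here
--     numbers = list(range(start, rows*cols + start))
--     zig = []
--     if len(numbers) == 0:
--         for i in range(rows):
--             zig.append([])
--     else:
--         while len(numbers) > 0:
--             zig.append(numbers[:cols])
--             numbers = numbers[cols:]
--     zag = []
--     for idx, val in enumerate(zig):
--         if idx % 2 == 0:
--             zag.append(sorted(val))
--         else:
--             zag.append(sorted(val, reverse=True))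
--     return zag
-- ===== SOURCE B (Python) =====
-- def create_zigzag(rows: int, cols: int, start: int = 1) -> list[list[int]]:
--     result = []
--     for r in range(rows):
--         lo = start + r * cols
--         hi = lo + cols
--         if r % 2:
--             result.append(list(range(hi - 1, lo - 1, -1)))
--         else:
--             result.append(list(range(lo, hi)))
--     return result
-- ===== Notes on version B (the rewrite author's own statement) =====
-- stated objective: faster
-- what changed: B computes each row directly as a range (descending range for odd rows), with no materialised full list, no repeated slicing of the remainder and no sorting; Pre_ only excludes rows<0 and cols<0, where A's while loop never terminates.
import Mathlib
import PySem

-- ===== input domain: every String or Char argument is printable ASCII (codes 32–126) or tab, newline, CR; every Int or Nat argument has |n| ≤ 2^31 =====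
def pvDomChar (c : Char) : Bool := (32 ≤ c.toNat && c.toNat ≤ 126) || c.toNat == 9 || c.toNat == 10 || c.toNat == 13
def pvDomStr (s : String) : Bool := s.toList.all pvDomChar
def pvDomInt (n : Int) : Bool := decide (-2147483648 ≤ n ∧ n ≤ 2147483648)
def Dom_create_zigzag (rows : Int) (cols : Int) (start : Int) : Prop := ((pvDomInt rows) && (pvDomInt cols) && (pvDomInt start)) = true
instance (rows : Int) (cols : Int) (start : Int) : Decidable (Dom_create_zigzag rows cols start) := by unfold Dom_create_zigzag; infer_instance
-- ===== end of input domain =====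

-- B builds each zigzag row directly as a range (descending for odd rows), skipping A's
-- repeated slicing of the remainder list and its per-row sorting; objective: faster.


-- ===== PORT A =====
-- A's `while len(numbers) > 0` loop, fuelled by the initial length of `numbers`
-- (on Pre_ each iteration removes min(cols, len) ≥ 1 elements, so the fuel suffices).
def pvWhileA (fuel : Nat) (numbers : List Int) (cols : Int) (zig : List (List Int)) : List (List Int) :=
  match fuel with
  | 0 => zig
  | fuel + 1 =>
    if numbers.length > 0 then
      pvWhileA fuel (PySem.List.slice numbers (some cols) none) cols
        (zig ++ [PySem.List.slice numbers none (some cols)])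
    else zig

def create_zigzag (rows : Int) (cols : Int) (start : Int) : List (List Int) :=
  let numbers := PySem.List.pyRange start (rows * cols + start) 1
  let zig :=
    if numbers.length = 0 then
      (PySem.List.pyRange 0 rows 1).foldl (fun z _ => z ++ [([] : List Int)]) []
    else
      pvWhileA numbers.length numbers cols []
  (PySem.List.enumerate zig).foldl
    (fun zag p =>
      if PySem.Int.mod p.1 2 = 0 then zag ++ [PySem.List.sorted p.2 (fun x => x)]
      else zag ++ [PySem.List.sorted p.2 (fun x => x) true]) []

-- ===== PORT B =====
def create_zigzag_alt (rows : Int) (cols : Int) (start : Int) : List (List Int) :=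
  (PySem.List.pyRange 0 rows 1).foldl
    (fun result r =>
      let lo := start + r * cols
      let hi := lo + cols
      if PySem.Int.mod r 2 ≠ 0 then result ++ [PySem.List.pyRange (hi - 1) (lo - 1) (-1)]
      else result ++ [PySem.List.pyRange lo hi 1]) []

-- ===== PRECONDITION & SPEC =====
-- Pre_ excludes exactly rows < 0 ∧ cols < 0: there rows*cols > 0, so A's while loop
-- slices with a negative cols, never shortens `numbers`, and diverges (no return value).
def Pre_create_zigzag (rows : Int) (cols : Int) (start : Int) : Prop := ¬ (rows < 0 ∧ cols < 0)
instance (rows : Int) (cols : Int) (start : Int) : Decidable (Pre_create_zigzag rows cols start) := by unfold Pre_create_zigzag; infer_instance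
def pvWitness_create_zigzag : Int × Int × Int := (3, 4, 5)

def Spec_create_zigzag (rows : Int) (cols : Int) (start : Int) (out : List (List Int)) : Prop := out = create_zigzag_alt rows cols start
instance (rows : Int) (cols : Int) (start : Int) (out : List (List Int)) : Decidable (Spec_create_zigzag rows cols start out) := by unfold Spec_create_zigzag; infer_instance

-- ===== CLAIM (what is proved, stated in full; the proofs are below) =====
def Claim_equal_create_zigzag : Prop := ∀ (rows : Int) (cols : Int) (start : Int), Dom_create_zigzag rows cols start → Pre_create_zigzag rows cols start → Spec_create_zigzag rows cols start (create_zigzag rows cols start)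

-- ===== LEMMAS AND PROOFS =====

-- a foldl whose body appends one element in both branches is a map
theorem pv_foldl_ite {α β : Type} (P : α → Prop) [DecidablePred P] (u v : α → β)
    (l : List α) (acc : List β) :
    l.foldl (fun r x => if P x then r ++ [u x] else r ++ [v x]) acc
      = acc ++ l.map (fun x => if P x then u x else v x) := by
  rw [show (fun (r : List β) x => if P x then r ++ [u x] else r ++ [v x])
        = (fun r x => r ++ [if P x then u x else v x]) from by
      funext r x; split <;> rfl]
  exact PySem.List.foldl_append_singleton_eq_map _ l acc

-- enumerate of a list given as a map over List.range
theorem pv_enumerate_map_range {α : Type} : ∀ (n : Nat) (f : Nat → α) (s : Int),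
    PySem.List.enumerate ((List.range n).map f) s
      = (List.range n).map (fun k : Nat => (s + (k : Int), f k)) := by
  intro n
  induction n with
  | zero => intro f s; rfl
  | succ n ih =>
    intro f s
    rw [List.range_succ_eq_map, List.map_cons, List.map_map]
    rw [show PySem.List.enumerate ((f 0) :: List.map (f ∘ Nat.succ) (List.range n)) s
          = (s, f 0) :: PySem.List.enumerate (List.map (f ∘ Nat.succ) (List.range n)) (s + 1) from rfl]
    rw [ih (f ∘ Nat.succ) (s + 1), List.map_cons, List.map_map]
    congr 1
    · norm_num
    · apply List.map_congr_left
      intro a _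
      simp only [Function.comp_apply, Nat.succ_eq_add_one]
      congr 1
      push_cast
      ring

-- A's chunking loop on a range of m·c consecutive integers yields the m per-row ranges.
theorem pvWhileA_chunks (m : Nat) : ∀ (fuel : Nat) (s c : Int) (acc : List (List Int)),
    0 < c → m * c.toNat ≤ fuel →
    pvWhileA fuel (PySem.List.pyRange s (s + m * c) 1) c acc
      = acc ++ (List.range m).map (fun r : Nat => PySem.List.pyRange (s + (r : Int) * c) (s + ((r : Int) + 1) * c) 1) := by
  induction m with
  | zero =>
    intro fuel s c acc hc _
    rw [PySem.List.pyRange_one_eq_nil (by simp)]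
    cases fuel <;> simp [pvWhileA]
  | succ m ih =>
    intro fuel s c acc hc hf
    have hc1 : 1 ≤ c.toNat := by omega
    have hmul : (m+1) * c.toNat = m * c.toNat + c.toNat := Nat.succ_mul m c.toNat
    obtain ⟨f, rfl⟩ : ∃ f, fuel = f + 1 := ⟨fuel - 1, by omega⟩
    have hmc : (0:Int) ≤ ↑m * c := by positivity
    have hp : (0:Int) < (↑(m+1):Int) * c := by positivity
    have harg : s + (↑(m+1):Int) * c = (s + c) + ↑m * c := by push_cast; ring
    have hsplit : PySem.List.pyRange s (s + (↑(m+1):Int) * c) 1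
        = PySem.List.pyRange s (s+c) 1 ++ PySem.List.pyRange (s+c) (s + (↑(m+1):Int)*c) 1 :=
      PySem.List.pyRange_one_append _ _ _ (by omega) (by rw [harg]; omega)
    have hlen1 : (PySem.List.pyRange s (s+c) 1).length = c.toNat := by
      rw [PySem.List.length_pyRange_one]; omega
    have hpos : 0 < (PySem.List.pyRange s (s + (↑(m+1):Int) * c) 1).length := by
      rw [PySem.List.length_pyRange_one]; omega
    simp only [pvWhileA, if_pos hpos]
    rw [PySem.List.slice_from _ (le_of_lt hc), PySem.List.slice_to _ (le_of_lt hc)]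
    rw [hsplit, List.take_left' hlen1, List.drop_left' hlen1]
    rw [harg, ih f (s+c) c _ hc (by omega)]
    have hmaps : List.map ((fun r : Nat => PySem.List.pyRange (s + (r:Int) * c) (s + ((r:Int) + 1) * c) 1) ∘ Nat.succ) (List.range m)
        = List.map (fun r : Nat => PySem.List.pyRange ((s + c) + (r:Int) * c) ((s + c) + ((r:Int) + 1) * c) 1) (List.range m) := by
      apply List.map_congr_left
      intro a _
      simp only [Function.comp_apply]
      congr 1 <;> push_cast <;> ring
    rw [List.range_succ_eq_map, List.map_cons, List.map_map, hmaps, List.append_assoc]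
    norm_num

theorem create_zigzag_spec : Claim_equal_create_zigzag := by
  intro rows cols start _ hpre
  unfold Pre_create_zigzag at hpre
  unfold Spec_create_zigzag create_zigzag create_zigzag_alt
  by_cases hr : rows ≤ 0
  · -- no rows: both sides are []
    have hrc : rows * cols ≤ 0 := by
      rcases lt_or_eq_of_le hr with h | h
      · exact mul_nonpos_of_nonpos_of_nonneg hr (by omega)
      · simp [h]
    rw [PySem.List.pyRange_one_eq_nil (show rows ≤ 0 from hr)]
    rw [PySem.List.pyRange_one_eq_nil (show rows * cols + start ≤ start by omega)]
    rfl
  · push Not at hr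
    have hm : rows = ((rows.toNat : Int)) := by omega
    by_cases hc : cols ≤ 0
    · -- rows > 0, cols ≤ 0: every row is empty on both sides
      have hrc : rows * cols ≤ 0 := mul_nonpos_of_nonneg_of_nonpos (by omega) hc
      rw [PySem.List.pyRange_one_eq_nil (show rows * cols + start ≤ start by omega)]
      simp only [List.length_nil, reduceIte]
      rw [hm, PySem.List.pyRange_zero_natCast]
      rw [PySem.List.foldl_append_singleton_eq_map (fun _ => ([] : List Int)) _ []]
      simp only [List.nil_append, List.map_map]
      rw [pv_enumerate_map_range]
      rw [pv_foldl_ite (fun p : Int × List Int => PySem.Int.mod p.1 2 = 0) _ _ _ []]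
      rw [pv_foldl_ite (fun r : Int => PySem.Int.mod r 2 ≠ 0) _ _ _ []]
      simp only [List.nil_append, List.map_map]
      apply List.map_congr_left
      intro k _
      simp only [Function.comp_apply]
      rw [PySem.List.pyRange_one_eq_nil (by omega), PySem.List.pyRange_neg_one_eq_nil (by omega)]
      split <;> split <;> rfl
    · -- main case: rows > 0, cols > 0
      push Not at hc
      have hb : rows * cols + start = start + (rows.toNat : Int) * cols := by rw [← hm]; ring
      rw [hb]
      have hlen : (PySem.List.pyRange start (start + (rows.toNat : Int) * cols) 1).length
          = rows.toNat * cols.toNat := by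
        rw [PySem.List.length_pyRange_one]
        rw [show start + (rows.toNat : Int) * cols - start = (rows.toNat : Int) * cols by ring]
        rw [Int.toNat_mul (by positivity) (le_of_lt hc), Int.toNat_natCast]
      have hlenpos : ¬ (PySem.List.pyRange start (start + (rows.toNat : Int) * cols) 1).length = 0 := by
        rw [hlen]
        have h1 : rows.toNat ≠ 0 := by omega
        have h2 : cols.toNat ≠ 0 := by omega
        exact Nat.mul_ne_zero h1 h2
      simp only [if_neg hlenpos]
      rw [hlen, pvWhileA_chunks rows.toNat _ start cols [] hc (le_of_eq rfl)]
      rw [List.nil_append]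
      rw [pv_enumerate_map_range rows.toNat _ 0]
      rw [pv_foldl_ite (fun p : Int × List Int => PySem.Int.mod p.1 2 = 0) _ _ _ []]
      rw [hm, PySem.List.pyRange_zero_natCast]
      rw [pv_foldl_ite (fun r : Int => PySem.Int.mod r 2 ≠ 0) _ _ _ []]
      simp only [List.nil_append, List.map_map]
      apply List.map_congr_left
      intro k _
      simp only [Function.comp_apply, zero_add]
      by_cases hk : PySem.Int.mod (k : Int) 2 = 0
      · rw [if_pos hk, if_neg (show ¬ (PySem.Int.mod (k : Int) 2 ≠ 0) from not_not.mpr hk)]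
        rw [PySem.List.sorted_eq_self_of_pairwise _ _
          ((PySem.List.pairwise_lt_pyRange_one _ _).imp (fun h => le_of_lt h))]
        congr 1
        ring
      · rw [if_neg hk, if_pos hk]
        rw [PySem.List.pyRange_neg_one_eq_reverse]
        rw [show start + (k : Int) * cols - 1 + 1 = start + (k : Int) * cols by ring,
            show start + (k : Int) * cols + cols - 1 + 1 = start + ((k : Int) + 1) * cols by ring]
        exact PySem.List.sorted_rev_eq_of_perm_of_pairwise_gt _ _ _
          (List.reverse_perm _)
          (List.pairwise_reverse.mpr (PySem.List.pairwise_lt_pyRange_one _ _))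

-- ===== VERDICT (by name: the statement is the Claim_ definition above) =====
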